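-- pv_equiv track=rewrite | github.com/infinite0x20/carmina | src/carmina/scansion.py | syllabify_word
-- ===== SOURCE A (Python) =====
-- vowels = "aeiou"
--
-- diphthongs = ['ae', 'au', 'ei', 'eu', 'oe', 'ui', 'oi']
--
-- def syllabify_word(text):
--     """
--     Syllabifies a single Latin word.
--
--     A word is syllabified by processing each character and checking for vowels, consonants, and diphthongs.
--     The function attempts to form syllables by breaking at consonants between vowels, following Latin syllabification rules.
--
--     Args:
--         text (str): The Latin word to syllabify.
--
--     Returns:
--         list: A list of syllables formed from the word.
--     """
--     syllables = []  # List to store syllables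
--     current_syllable = ""  # Temporary syllable container
--
--     i = 0
--     while i < len(text):
--         # If the current character is a vowel, check for diphthongs or single vowels
--         if text[i] in vowels:
--             if i + 1 < len(text) and text[i:i+2] in diphthongs:
--                 # If it's a diphthong, treat both vowels as one syllable
--                 current_syllable += text[i:i+2]
--                 i += 2  # Skip the next character as it is part of the diphthong
--             else:
--                 # Otherwise, just add the vowel to the syllable
--                 current_syllable += text[i]
--                 i += 1
--         else:
--             # If it's a consonant, add it to the syllable
--             current_syllable += text[i]
--             i += 1
--
--         # If the syllable is complete (contains at least one vowel), add it to the list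
--         if len(current_syllable) > 1 and any(c in vowels for c in current_syllable):
--             syllables.append(current_syllable)
--             current_syllable = ""  # Reset the syllable container
--
--     # If anything remains in current_syllable after the loop, append it
--     if current_syllable:
--         syllables.append(current_syllable)
--
--     return syllables
-- ===== SOURCE B (Python) =====
-- vowels = "aeiou"
--
-- diphthongs = ['ae', 'au', 'ei', 'eu', 'oe', 'ui', 'oi']
--
-- def syllabify_word(text):
--     """Two-pass syllabifier: tokenize into diphthong/char units, then flush-fold."""
--     # Pass 1: split the word into units (a diphthong pair or a single char).
--     units = []
--     i = 0
--     n = len(text)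
--     while i < n:
--         if i + 1 < n and text[i:i+2] in diphthongs:
--             units.append(text[i:i+2])
--             i += 2
--         else:
--             units.append(text[i])
--             i += 1
--     # Pass 2: accumulate units, flushing whenever the chunk has length > 1
--     # and contains a vowel.
--     syllables = []
--     current = ""
--     for u in units:
--         current += u
--         if len(current) > 1 and any(c in vowels for c in current):
--             syllables.append(current)
--             current = ""
--     if current:
--         syllables.append(current)
--     return syllables
-- ===== Notes on version B (the rewrite author's own statement) =====
-- stated objective: alternative
-- what changed: Replaces A's single interleaved index-while loop (vowel test, then diphthong test, then inline flush) by two passes: first tokenize the word into an explicit list of units (diphthong pair or single char, no separate vowel branch), then fold the unit list with the flush rule.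
import Mathlib
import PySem

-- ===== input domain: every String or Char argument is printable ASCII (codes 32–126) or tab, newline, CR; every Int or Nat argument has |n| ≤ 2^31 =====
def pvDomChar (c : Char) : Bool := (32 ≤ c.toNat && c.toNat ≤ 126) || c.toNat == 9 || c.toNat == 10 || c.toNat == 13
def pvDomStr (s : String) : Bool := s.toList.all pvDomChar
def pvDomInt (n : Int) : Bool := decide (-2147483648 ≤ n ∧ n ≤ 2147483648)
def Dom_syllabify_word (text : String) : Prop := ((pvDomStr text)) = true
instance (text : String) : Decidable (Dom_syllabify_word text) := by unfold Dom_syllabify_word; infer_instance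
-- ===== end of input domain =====

-- B restructures A's single interleaved while loop into a tokenize pass plus a flush-fold pass (alternative decomposition, same cost).

-- ===== PORT A =====
-- vowels = "aeiou" (as chars)
def vowelsA : List Char := ['a', 'e', 'i', 'o', 'u']
-- diphthongs as their character lists (the 2-char slice text[i:i+2] is exactly [c, d])
def diphthongsA : List (List Char) := [['a','e'], ['a','u'], ['e','i'], ['e','u'], ['o','e'], ['u','i'], ['o','i']]
-- len(current) > 1 and any(c in vowels for c in current)
def flushA (cur : List Char) : Bool := decide (cur.length > 1) && cur.any (fun ch => ch ∈ vowelsA)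
-- the while loop: state = (remaining chars, current_syllable, syllables)
def loopA : List Char → List Char → List String → List String
  | [], cur, syl => if cur = [] then syl else syl ++ [String.mk cur]
  | c :: rest, cur, syl =>
    if c ∈ vowelsA then
      match rest with
      | d :: rest2 =>
        if [c, d] ∈ diphthongsA then
          if flushA (cur ++ [c, d]) then loopA rest2 [] (syl ++ [String.mk (cur ++ [c, d])])
          else loopA rest2 (cur ++ [c, d]) syl
        else
          if flushA (cur ++ [c]) then loopA (d :: rest2) [] (syl ++ [String.mk (cur ++ [c])])
          else loopA (d :: rest2) (cur ++ [c]) syl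
      | [] =>
        if flushA (cur ++ [c]) then loopA [] [] (syl ++ [String.mk (cur ++ [c])])
        else loopA [] (cur ++ [c]) syl
    else
      if flushA (cur ++ [c]) then loopA rest [] (syl ++ [String.mk (cur ++ [c])])
      else loopA rest (cur ++ [c]) syl

def syllabify_word (text : String) : List String := loopA text.toList [] []

-- ===== PORT B =====
def vowelsB : List Char := ['a', 'e', 'i', 'o', 'u']
def diphthongsB : List (List Char) := [['a','e'], ['a','u'], ['e','i'], ['e','u'], ['o','e'], ['u','i'], ['o','i']]
-- pass 1: split into units (diphthong pair or single char)
def tokenizeB : List Char → List (List Char)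
  | [] => []
  | [c] => [[c]]
  | c :: d :: rest =>
    if [c, d] ∈ diphthongsB then [c, d] :: tokenizeB rest
    else [c] :: tokenizeB (d :: rest)
def flushB (cur : List Char) : Bool := decide (cur.length > 1) && cur.any (fun ch => ch ∈ vowelsB)
-- pass 2: the for-loop over units, state = (syllables, current)
def stepB (st : List String × List Char) (u : List Char) : List String × List Char :=
  let cur' := st.2 ++ u
  if flushB cur' then (st.1 ++ [String.mk cur'], []) else (st.1, cur')

def syllabify_word_alt (text : String) : List String :=
  let st := (tokenizeB text.toList).foldl stepB ([], [])
  if st.2 = [] then st.1 else st.1 ++ [String.mk st.2]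

-- ===== PRECONDITION & SPEC =====
def Spec_syllabify_word (text : String) (out : List String) : Prop := out = syllabify_word_alt text
instance (text : String) (out : List String) : Decidable (Spec_syllabify_word text out) := by unfold Spec_syllabify_word; infer_instance

-- ===== CLAIM (what is proved, stated in full; the proofs are below) =====
def Claim_equal_syllabify_word : Prop := ∀ (text : String), Dom_syllabify_word text → Spec_syllabify_word text (syllabify_word text)

-- ===== LEMMAS AND PROOFS =====
lemma diph_vowel {c d : Char} (h : [c, d] ∈ diphthongsB) : c ∈ vowelsA := by
  simp [diphthongsB] at h
  rcases h with ⟨h1, h2⟩ | ⟨h1, h2⟩ | ⟨h1, h2⟩ | ⟨h1, h2⟩ | ⟨h1, h2⟩ | ⟨h1, h2⟩ | ⟨h1, h2⟩ <;>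
    subst h1 <;> decide

lemma loopA_eq_fold : ∀ (cs cur : List Char) (syl : List String),
    loopA cs cur syl =
      (let st := (tokenizeB cs).foldl stepB (syl, cur)
       if st.2 = [] then st.1 else st.1 ++ [String.mk st.2]) := by
  intro cs
  induction cs using tokenizeB.induct with
  | case1 => intro cur syl; simp [loopA, tokenizeB]
  | case2 c =>
    intro cur syl
    by_cases hv : c ∈ vowelsA
    · simp only [loopA, if_pos hv, tokenizeB, List.foldl, stepB]
      by_cases hf : flushB (cur ++ [c])
      · have hfA : flushA (cur ++ [c]) = true := hf
        simp [hfA, if_pos hf, loopA]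
      · have hfA : ¬ flushA (cur ++ [c]) = true := hf
        simp [if_neg hfA, if_neg hf, loopA]
    · simp only [loopA, if_neg hv, tokenizeB, List.foldl, stepB]
      by_cases hf : flushB (cur ++ [c])
      · have hfA : flushA (cur ++ [c]) = true := hf
        simp [hfA, if_pos hf, loopA]
      · have hfA : ¬ flushA (cur ++ [c]) = true := hf
        simp [if_neg hfA, if_neg hf, loopA]
  | case3 c d rest hd ih =>
    intro cur syl
    have hv : c ∈ vowelsA := diph_vowel hd
    simp only [loopA, if_pos hv, if_pos hd, tokenizeB, List.foldl, stepB]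
    have hd' : [c, d] ∈ diphthongsA := hd
    rw [if_pos hd']
    by_cases hf : flushB (cur ++ [c, d])
    · have hfA : flushA (cur ++ [c, d]) = true := hf
      simp only [hfA, if_pos hf, if_true]
      exact ih [] (syl ++ [String.mk (cur ++ [c, d])])
    · have hfA : ¬ flushA (cur ++ [c, d]) = true := hf
      simp only [if_neg hfA, if_neg hf]
      exact ih (cur ++ [c, d]) syl
  | case4 c d rest hd ih =>
    intro cur syl
    have hd' : [c, d] ∉ diphthongsA := hd
    simp only [tokenizeB, if_neg hd, List.foldl, stepB]
    by_cases hv : c ∈ vowelsA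
    · simp only [loopA, if_pos hv, if_neg hd']
      by_cases hf : flushB (cur ++ [c])
      · have hfA : flushA (cur ++ [c]) = true := hf
        simp only [hfA, if_pos hf, if_true]
        exact ih [] (syl ++ [String.mk (cur ++ [c])])
      · have hfA : ¬ flushA (cur ++ [c]) = true := hf
        simp only [if_neg hfA, if_neg hf]
        exact ih (cur ++ [c]) syl
    · simp only [loopA, if_neg hv]
      by_cases hf : flushB (cur ++ [c])
      · have hfA : flushA (cur ++ [c]) = true := hf
        simp only [hfA, if_pos hf, if_true]
        exact ih [] (syl ++ [String.mk (cur ++ [c])])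
      · have hfA : ¬ flushA (cur ++ [c]) = true := hf
        simp only [if_neg hfA, if_neg hf]
        exact ih (cur ++ [c]) syl

-- ===== VERDICT (by name: the statement is the Claim_ definition above) =====
theorem syllabify_word_spec : Claim_equal_syllabify_word := by
  intro text _
  unfold Spec_syllabify_word syllabify_word syllabify_word_alt
  exact loopA_eq_fold text.toList [] []
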